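-- pv_equiv track=rewrite | github.com/Harshithk09/Court_Kiosk | court-kiosk/backend/utils/llm_service.py | _estimate_time_remaining
-- ===== SOURCE A (Python) =====
-- from typing import List, Dict, Any, Optional
--
-- def _estimate_time_remaining(user_path: List[str], nodes: Dict) -> int:
--     """
--     Estimate time remaining based on user's progress
--     """
--     if not user_path:
--         return 45  # Default estimate for new cases
--
--     # Base time estimates for different node types
--     time_estimates = {
--         'start': 2,
--         'process': 5,
--         'decision': 3,
--         'end': 1
--     }
--
--     # Calculate remaining time based on node types
--     remaining_time = 0
--     for node_id, node in nodes.items():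
--         if node_id not in user_path:
--             node_type = node.get('type', 'process')
--             remaining_time += time_estimates.get(node_type, 5)
--
--     return max(5, remaining_time)  # Minimum 5 minutes
-- ===== SOURCE B (Python) =====
-- def _estimate_time_remaining(user_path, nodes):
--     """Estimate time remaining via complement: total estimate minus visited estimate."""
--     if not user_path:
--         return 45
--
--     time_estimates = {
--         'start': 2,
--         'process': 5,
--         'decision': 3,
--         'end': 1
--     }
--
--     def est(node):
--         return time_estimates.get(node.get('type', 'process'), 5)
--
--     # Total estimate of the whole graph, with no membership test at all.
--     total = sum(est(node) for node in nodes.values())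
--     # Estimate already covered by the user's path (flipped membership test).
--     visited = sum(est(node) for node_id, node in nodes.items() if node_id in user_path)
--
--     return max(5, total - visited)
-- ===== Notes on version B (the rewrite author's own statement) =====
-- stated objective: alternative
-- what changed: B computes the estimate of the whole graph unconditionally, separately sums the estimate of the nodes the user already visited, and returns max(5, total - visited), instead of A's single filtered accumulation over unvisited nodes.
import Mathlib
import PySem

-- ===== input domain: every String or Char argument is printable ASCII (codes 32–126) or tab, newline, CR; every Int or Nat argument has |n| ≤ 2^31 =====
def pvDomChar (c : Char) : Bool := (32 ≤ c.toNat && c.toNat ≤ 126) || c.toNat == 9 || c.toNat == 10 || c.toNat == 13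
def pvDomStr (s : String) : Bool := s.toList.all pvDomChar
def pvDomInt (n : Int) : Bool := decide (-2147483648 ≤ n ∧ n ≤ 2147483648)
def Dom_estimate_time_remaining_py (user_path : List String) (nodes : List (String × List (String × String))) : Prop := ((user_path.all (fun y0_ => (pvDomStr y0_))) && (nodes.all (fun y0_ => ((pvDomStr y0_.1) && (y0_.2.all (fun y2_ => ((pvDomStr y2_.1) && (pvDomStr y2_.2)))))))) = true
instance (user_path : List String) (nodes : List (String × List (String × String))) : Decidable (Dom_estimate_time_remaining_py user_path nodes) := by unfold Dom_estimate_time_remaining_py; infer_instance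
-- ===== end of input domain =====

-- B sums the estimate of the whole graph and subtracts the estimate of the visited nodes (complement subtraction); alternative decomposition, same cost.

-- ===== PORT A =====
-- the time_estimates dict literal (shared constant of both Pythons)
def timeEstimates : PySem.Dict String Int :=
  PySem.Dict.ofList [("start", 2), ("process", 5), ("decision", 3), ("end", 1)]

def estimate_time_remaining_py (user_path : List String) (nodes : List (String × List (String × String))) : Int :=
  if user_path = [] then 45
  else
    -- for node_id, node in nodes.items(): if node_id not in user_path: remaining += estimates.get(type, 5)
    let remaining_time : Int := nodes.foldl (fun acc p =>
      if user_path.contains p.1 then acc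
      else acc + timeEstimates.getD ((PySem.Dict.ofList p.2).getD "type" "process") 5) 0
    max 5 remaining_time

-- ===== PORT B =====
-- est(node) = time_estimates.get(node.get('type','process'), 5)
def pvEst (node : List (String × String)) : Int :=
  timeEstimates.getD ((PySem.Dict.ofList node).getD "type" "process") 5

def estimate_time_remaining_py_alt (user_path : List String) (nodes : List (String × List (String × String))) : Int :=
  if user_path = [] then 45
  else
    -- total = sum(est(node) for node in nodes.values())
    let total : Int := (nodes.map (fun p => pvEst p.2)).sum
    -- visited = sum(est(node) for node_id, node in nodes.items() if node_id in user_path)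
    let visited : Int := ((nodes.filter (fun p => user_path.contains p.1)).map (fun p => pvEst p.2)).sum
    max 5 (total - visited)

-- ===== PRECONDITION & SPEC =====
def Spec_estimate_time_remaining_py (user_path : List String) (nodes : List (String × List (String × String))) (out : Int) : Prop := out = estimate_time_remaining_py_alt user_path nodes
instance (user_path : List String) (nodes : List (String × List (String × String))) (out : Int) : Decidable (Spec_estimate_time_remaining_py user_path nodes out) := by unfold Spec_estimate_time_remaining_py; infer_instance

-- ===== CLAIM (what is proved, stated in full; the proofs are below) =====
def Claim_equal_estimate_time_remaining_py : Prop := ∀ (user_path : List String) (nodes : List (String × List (String × String))), Dom_estimate_time_remaining_py user_path nodes → Spec_estimate_time_remaining_py user_path nodes (estimate_time_remaining_py user_path nodes)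

-- ===== LEMMAS AND PROOFS =====

-- A's filtered accumulation equals B's total-minus-visited, by induction on the node list
lemma aFold_eq_total_sub_visited (user_path : List String)
    (nodes : List (String × List (String × String))) (acc : Int) :
    nodes.foldl (fun acc p =>
      if user_path.contains p.1 then acc
      else acc + timeEstimates.getD ((PySem.Dict.ofList p.2).getD "type" "process") 5) acc
    = acc + ((nodes.map (fun p => pvEst p.2)).sum
        - ((nodes.filter (fun p => user_path.contains p.1)).map (fun p => pvEst p.2)).sum) := by
  induction nodes generalizing acc with
  | nil => simp
  | cons p rest ih =>
    rw [List.foldl_cons]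
    by_cases h : user_path.contains p.1 = true
    · rw [if_pos h, ih]
      have h' : p.1 ∈ user_path := by simpa using h
      simp [h', pvEst]
    · rw [if_neg h, ih]
      have h' : p.1 ∉ user_path := by simpa using h
      simp [h', pvEst]
      ring

-- ===== VERDICT (by name: the statement is the Claim_ definition above) =====
theorem estimate_time_remaining_py_spec : Claim_equal_estimate_time_remaining_py := by
  intro user_path nodes _
  unfold Spec_estimate_time_remaining_py estimate_time_remaining_py estimate_time_remaining_py_alt
  by_cases h : user_path = []
  · simp [h]
  · simp only [h, if_false]
    rw [aFold_eq_total_sub_visited, zero_add]
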